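-- pv_equiv track=rewrite | github.com/taoxu0903/skills | custom-skills/iphone_mirror_auto/scripts/ocr_engine.py | find_text
-- ===== SOURCE A (Python) =====
-- def find_text(ocr_results, keyword, fuzzy=True):
--     """Find an OCR result containing the given keyword.
--
--     When fuzzy matching, prefers shorter matches (more likely to be a button
--     rather than a sentence containing the keyword).
--
--     Args:
--         ocr_results: List from ocr_screenshot().
--         keyword: Text to search for.
--         fuzzy: If True, match substring (prefer shortest). If False, exact match.
--
--     Returns:
--         The matching result dict, or None if not found.
--     """
--     if not fuzzy:
--         for r in ocr_results:
--             if keyword == r["text"]: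
--                 return r
--         return None
--
--     # Fuzzy: collect all matches, return the shortest (most likely a button)
--     matches = [r for r in ocr_results if keyword in r["text"]]
--     if matches:
--         matches.sort(key=lambda r: len(r["text"]))
--         return matches[0]
--     return None
-- ===== SOURCE B (Python) =====
-- def find_text(ocr_results, keyword, fuzzy=True):
--     """Find an OCR result containing the given keyword (see A's docstring)."""
--     if not fuzzy:
--         return next((r for r in ocr_results if keyword == r["text"]), None)
--     # Fuzzy: one running-minimum pass; strict < keeps the first shortest match.
--     best = None
--     for r in ocr_results:
--         if keyword in r["text"]:
--             if best is None or len(r["text"]) < len(best["text"]):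
--                 best = r
--     return best
-- ===== Notes on version B (the rewrite author's own statement) =====
-- stated objective: faster
-- what changed: The fuzzy branch no longer builds a matches list and sorts it by length: a single pass keeps a running best (replaced only on a strictly shorter match, preserving the stable-sort first-occurrence tie-break); the exact branch becomes an idiomatic next(...) generator.
-- outside the precondition, e.g. on find_text([{'text': 'ab'}, {'x': 'y'}], 'a', True): A raises KeyError, B raises KeyError
import Mathlib
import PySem

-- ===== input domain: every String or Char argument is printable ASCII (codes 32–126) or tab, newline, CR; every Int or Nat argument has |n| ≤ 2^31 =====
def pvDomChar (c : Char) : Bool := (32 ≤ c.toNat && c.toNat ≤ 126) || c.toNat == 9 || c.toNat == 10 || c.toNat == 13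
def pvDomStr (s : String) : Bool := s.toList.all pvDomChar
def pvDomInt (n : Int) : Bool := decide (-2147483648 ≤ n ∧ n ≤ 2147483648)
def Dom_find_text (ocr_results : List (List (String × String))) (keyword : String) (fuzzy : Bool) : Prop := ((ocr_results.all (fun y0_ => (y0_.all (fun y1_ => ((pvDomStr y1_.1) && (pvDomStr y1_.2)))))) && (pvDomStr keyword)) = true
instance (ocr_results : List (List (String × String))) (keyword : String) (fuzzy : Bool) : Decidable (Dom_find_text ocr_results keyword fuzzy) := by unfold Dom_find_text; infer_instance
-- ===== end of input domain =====

-- B replaces A's collect-matches-then-stable-sort fuzzy branch by a single running-minimum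
-- pass (strict <, so the first shortest match is kept): faster, no intermediate list.

-- shared helper: r["text"] on the association list (first match); Python raises KeyError when
-- the key is absent — exactly those inputs are excluded by Pre_find_text, so the "" default
-- is never observed on admitted inputs.
def pyText (r : List (String × String)) : String :=
  (((r.find? (fun kv => kv.1 == "text")).map Prod.snd).getD "")

-- ===== PORT A =====
-- the 'for r in ocr_results: if keyword == r["text"]: return r' loop
def findTextExactLoop (ocr_results : List (List (String × String))) (keyword : String) :
    Option (List (String × String)) :=
  match ocr_results with
  | [] => none
  | r :: rest =>
    if keyword == pyText r then some r else findTextExactLoop rest keyword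

def find_text (ocr_results : List (List (String × String))) (keyword : String) (fuzzy : Bool) :
    Option (List (String × String)) :=
  if !fuzzy then
    findTextExactLoop ocr_results keyword
  else
    -- matches = [r for r in ocr_results if keyword in r["text"]]
    let ms := ocr_results.filter (fun r => PySem.Str.isIn keyword (pyText r))
    if ms ≠ [] then
      -- matches.sort(key=lambda r: len(r["text"])); return matches[0]
      (PySem.List.sorted ms (fun r => PySem.Str.len (pyText r))).head?
    else
      none

-- ===== PORT B =====
def find_text_alt (ocr_results : List (List (String × String))) (keyword : String) (fuzzy : Bool) :
    Option (List (String × String)) :=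
  if !fuzzy then
    -- next((r for r in ocr_results if keyword == r["text"]), None)
    ocr_results.find? (fun r => keyword == pyText r)
  else
    -- running best, replaced only on a strictly shorter match
    ocr_results.foldl
      (fun best r =>
        if PySem.Str.isIn keyword (pyText r) then
          match best with
          | none => some r
          | some b =>
            if PySem.Str.len (pyText r) < PySem.Str.len (pyText b) then some r else some b
        else best)
      none

-- ===== PRECONDITION & SPEC =====
-- Pre_ excludes exactly the inputs on which Python A raises KeyError: a dict without a "text"
-- key that the scan actually reaches (in the exact branch the scan stops at the first match,
-- so only dicts before the first exact match must carry the key).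
def Pre_find_text (ocr_results : List (List (String × String))) (keyword : String) (fuzzy : Bool) : Prop :=
  if fuzzy then
    ∀ r ∈ ocr_results, (r.find? (fun kv => kv.1 == "text")).isSome = true
  else
    ∀ r ∈ ocr_results.takeWhile
        (fun r => !((r.find? (fun kv => kv.1 == "text")).map Prod.snd == some keyword)),
      (r.find? (fun kv => kv.1 == "text")).isSome = true
instance (ocr_results : List (List (String × String))) (keyword : String) (fuzzy : Bool) : Decidable (Pre_find_text ocr_results keyword fuzzy) := by unfold Pre_find_text; infer_instance

def pvWitness_find_text : (List (List (String × String))) × String × Bool :=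
  ([[("text", "ok go")], [("text", "ok")]], "ok", true)

def Spec_find_text (ocr_results : List (List (String × String))) (keyword : String) (fuzzy : Bool) (out : Option (List (String × String))) : Prop := out = find_text_alt ocr_results keyword fuzzy
instance (ocr_results : List (List (String × String))) (keyword : String) (fuzzy : Bool) (out : Option (List (String × String))) : Decidable (Spec_find_text ocr_results keyword fuzzy out) := by unfold Spec_find_text; infer_instance

-- ===== CLAIM (what is proved, stated in full; the proofs are below) =====
def Claim_equal_find_text : Prop := ∀ (ocr_results : List (List (String × String))) (keyword : String) (fuzzy : Bool), Dom_find_text ocr_results keyword fuzzy → Pre_find_text ocr_results keyword fuzzy → Spec_find_text ocr_results keyword fuzzy (find_text ocr_results keyword fuzzy)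

-- ===== LEMMAS AND PROOFS =====

-- exact branch: the early-return loop IS List.find?
theorem findTextExactLoop_eq_find? (ocr_results : List (List (String × String))) (keyword : String) :
    findTextExactLoop ocr_results keyword = ocr_results.find? (fun r => keyword == pyText r) := by
  induction ocr_results with
  | nil => rfl
  | cons r rest ih =>
    simp only [findTextExactLoop, List.find?]
    by_cases h : (keyword == pyText r) = true
    · simp [h]
    · simp only [Bool.not_eq_true] at h
      simp [h, ih]

-- the head of the insertion-sort accumulator evolves exactly as B's running minimum
theorem head_foldl_insertBy {α κ : Type} [LinearOrder κ] (key : α → κ) :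
    ∀ (xs : List α) (acc : List α),
      (xs.foldl (fun a x => PySem.List.insertBy (fun a b => decide (key a < key b)) x a) acc).head?
        = xs.foldl
            (fun m y =>
              match m with
              | none => some y
              | some b => if key y < key b then some y else some b)
            acc.head? := by
  intro xs
  induction xs with
  | nil => intro acc; rfl
  | cons x t ih =>
    intro acc
    rw [List.foldl_cons, List.foldl_cons, ih]
    congr 1
    cases acc with
    | nil => simp [PySem.List.insertBy]
    | cons h rest =>
      simp only [PySem.List.insertBy, List.head?]
      by_cases hx : key x < key h
      · simp [hx]
      · simp [hx]

-- B's guarded fold over the whole list equals the plain running-minimum fold over the filtered list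
theorem foldl_guard_eq_foldl_filter {α : Type} (p : α → Bool)
    (step : Option α → α → Option α) :
    ∀ (xs : List α) (init : Option α),
      xs.foldl (fun best r => if p r then step best r else best) init
        = (xs.filter p).foldl step init := by
  intro xs
  induction xs with
  | nil => intro init; rfl
  | cons x t ih =>
    intro init
    by_cases hp : p x = true
    · simp [hp, ih]
    · simp only [Bool.not_eq_true] at hp
      simp [hp, ih]

-- pointwise-equal fold steps give equal folds (used to align the two elaborations of B's step)
theorem foldl_ext_opt {α : Type} (f g : Option α → α → Option α)
    (h : ∀ m r, f m r = g m r) :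
    ∀ (xs : List α) (init : Option α), xs.foldl f init = xs.foldl g init := by
  intro xs
  induction xs with
  | nil => intro init; rfl
  | cons x t ih => intro init; simp [List.foldl_cons, h, ih]

-- ===== VERDICT (by name: the statement is the Claim_ definition above) =====
theorem find_text_spec : Claim_equal_find_text := by
  intro ocr_results keyword fuzzy _ _
  unfold Spec_find_text find_text find_text_alt
  cases fuzzy with
  | false =>
    simp [findTextExactLoop_eq_find?]
  | true =>
    simp only [Bool.not_true, if_neg (by decide : ¬ ((false : Bool) = true))]
    rw [foldl_guard_eq_foldl_filter]
    set ms := ocr_results.filter (fun r => PySem.Str.isIn keyword (pyText r)) with hms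
    by_cases h : ms = []
    · simp [h]
    · rw [if_pos h, PySem.List.sorted_eq_foldl_insertBy,
        head_foldl_insertBy (fun r => PySem.Str.len (pyText r)) ms []]
      simp only [List.head?]
      exact foldl_ext_opt _ _ (fun m r => by cases m <;> rfl) ms none
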